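-- pv_equiv track=rewrite | github.com/Cissou34730/Azure-Architect-Assistant | backend/app/agents_system/tools/project_document_tool.py | _find_keyword_excerpts
-- ===== SOURCE A (Python) =====
-- _EXCERPT_CONTEXT_CHARS = 500
--
-- def _find_keyword_excerpts(
--     text: str, query: str, max_excerpts: int = 3
-- ) -> list[str]:
--     """Find excerpts around keyword matches in text.
--
--     Uses case-insensitive search for each query word.
--     Returns up to max_excerpts context windows around matches.
--     """
--     if not text or not query:
--         return []
--
--     query_words = [w for w in query.lower().split() if len(w) >= 3]
--     if not query_words:
--         query_words = query.lower().split()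
--
--     excerpts: list[str] = []
--     text_lower = text.lower()
--     seen_positions: set[int] = set()
--
--     for word in query_words:
--         start = 0
--         while start < len(text_lower) and len(excerpts) < max_excerpts:
--             pos = text_lower.find(word, start)
--             if pos < 0:
--                 break
--
--             # Avoid overlapping excerpts
--             bucket = pos // _EXCERPT_CONTEXT_CHARS
--             if bucket in seen_positions:
--                 start = pos + len(word)
--                 continue
--             seen_positions.add(bucket)
--
--             # Extract context window around match
--             excerpt_start = max(0, pos - _EXCERPT_CONTEXT_CHARS // 2)
--             excerpt_end = min(len(text), pos + len(word) + _EXCERPT_CONTEXT_CHARS // 2)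
--             excerpt = text[excerpt_start:excerpt_end].strip()
--
--             if excerpt_start > 0:
--                 excerpt = "..." + excerpt
--             if excerpt_end < len(text):
--                 excerpt = excerpt + "..."
--
--             excerpts.append(excerpt)
--             start = pos + len(word)
--
--     return excerpts
-- ===== SOURCE B (Python) =====
-- _EXCERPT_CONTEXT_CHARS = 500
--
--
-- def _find_keyword_excerpts(text, query, max_excerpts=3):
--     """Two-phase variant: first collect all non-overlapping match positions
--     per query word, then emit deduplicated context windows in one pass."""
--     if not text or not query:
--         return []
--
--     query_words = [w for w in query.lower().split() if len(w) >= 3]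
--     if not query_words:
--         query_words = query.lower().split()
--
--     text_lower = text.lower()
--
--     # Phase 1: word-major, position-ascending list of (word, pos) matches.
--     matches = []
--     for word in query_words:
--         start = 0
--         while True:
--             pos = text_lower.find(word, start)
--             if pos < 0:
--                 break
--             matches.append((word, pos))
--             start = pos + len(word)
--
--     # Phase 2: single emission pass with bucket dedup and count cut-off.
--     excerpts = []
--     seen_buckets = set()
--     for word, pos in matches:
--         if len(excerpts) >= max_excerpts:
--             break
--         bucket = pos // _EXCERPT_CONTEXT_CHARS
--         if bucket in seen_buckets:
--             continue
--         seen_buckets.add(bucket)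
--
--         excerpt_start = max(0, pos - _EXCERPT_CONTEXT_CHARS // 2)
--         excerpt_end = min(len(text), pos + len(word) + _EXCERPT_CONTEXT_CHARS // 2)
--         excerpt = text[excerpt_start:excerpt_end].strip()
--         if excerpt_start > 0:
--             excerpt = "..." + excerpt
--         if excerpt_end < len(text):
--             excerpt = excerpt + "..."
--         excerpts.append(excerpt)
--
--     return excerpts
-- ===== Notes on version B (the rewrite author's own statement) =====
-- stated objective: alternative
-- what changed: A interleaves searching and emission in one nested loop with the count cut-off controlling the scan; B splits the work into two phases: first collect all non-overlapping (word, position) matches word-major, then a single emission pass that dedups by bucket and stops at max_excerpts.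
import Mathlib
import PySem

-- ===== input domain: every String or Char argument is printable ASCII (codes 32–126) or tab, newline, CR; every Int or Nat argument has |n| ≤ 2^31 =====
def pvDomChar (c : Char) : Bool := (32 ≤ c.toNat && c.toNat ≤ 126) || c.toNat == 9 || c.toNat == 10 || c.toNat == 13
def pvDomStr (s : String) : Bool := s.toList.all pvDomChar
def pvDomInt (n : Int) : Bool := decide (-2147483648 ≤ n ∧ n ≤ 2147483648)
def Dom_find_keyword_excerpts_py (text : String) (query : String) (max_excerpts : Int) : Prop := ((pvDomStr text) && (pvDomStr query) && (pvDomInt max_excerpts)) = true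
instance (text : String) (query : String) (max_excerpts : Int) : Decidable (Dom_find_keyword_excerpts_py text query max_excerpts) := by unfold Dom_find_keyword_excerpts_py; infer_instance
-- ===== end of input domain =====

-- B re-decomposes A's interleaved search-and-emit nested loop into two phases
-- (collect all non-overlapping matches word-major, then one emission pass);
-- objective: alternative decomposition, same cost.

-- The context-window construction: identical lines of Python in A and in B
-- (excerpt_start/excerpt_end, slice, strip, "..." affixes), shared as one helper.
def pvContextWindow (t word : List Char) (pos : Int) : List Char :=
  let exStart := max 0 (pos - PySem.Int.floordiv 500 2)
  let exEnd := min ((t.length : Int)) (pos + (word.length : Int) + PySem.Int.floordiv 500 2)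
  let ex := PySem.Chars.strip (PySem.List.slice t (some exStart) (some exEnd))
  let ex' := if 0 < exStart then ('.' :: '.' :: '.' :: ex) else ex
  if exEnd < (t.length : Int) then ex' ++ ['.', '.', '.'] else ex'

-- ===== PORT A =====
-- A's inner while loop for one word: fuel-based recursion (the Python loop's
-- start strictly increases each pass, so fuel = len(text)+1 is never exhausted).
def pvA_word (textL t word : List Char) (maxE : Int) :
    Nat → Int → List String × PySem.Set Int → List String × PySem.Set Int
  | 0, _, s => s
  | n+1, start, s =>
    if start < (textL.length : Int) ∧ (s.1.length : Int) < maxE then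
      if PySem.Chars.findFrom textL word start none < 0 then s
      else
        if PySem.Set.contains s.2 (PySem.Int.floordiv (PySem.Chars.findFrom textL word start none) 500) then
          pvA_word textL t word maxE n (PySem.Chars.findFrom textL word start none + (word.length : Int)) s
        else
          pvA_word textL t word maxE n (PySem.Chars.findFrom textL word start none + (word.length : Int))
            (s.1 ++ [String.ofList (pvContextWindow t word (PySem.Chars.findFrom textL word start none))],
             s.2.add (PySem.Int.floordiv (PySem.Chars.findFrom textL word start none) 500))
    else s

def find_keyword_excerpts_py (text : String) (query : String) (max_excerpts : Int) : List String :=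
  let t := text.toList
  let q := query.toList
  if t = [] ∨ q = [] then []
  else
    let splitWords := PySem.Chars.split₀ (PySem.Chars.lower q)
    let filtered := splitWords.filter (fun w => 3 ≤ w.length)
    let query_words := if filtered = [] then splitWords else filtered
    let textL := PySem.Chars.lower t
    (query_words.foldl
      (fun s w => pvA_word textL t w max_excerpts (t.length + 1) 0 s)
      ([], PySem.Set.ofList [])).1

-- ===== PORT B =====
-- Phase 1: all non-overlapping (word, pos) matches of one word, from start on.
def pvB_collect (textL word : List Char) : Nat → Int → List (List Char × Int)
  | 0, _ => []
  | n+1, start =>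
    if PySem.Chars.findFrom textL word start none < 0 then []
    else (word, PySem.Chars.findFrom textL word start none) ::
      pvB_collect textL word n (PySem.Chars.findFrom textL word start none + (word.length : Int))

-- Phase 2: one emission pass over the match list with bucket dedup and cut-off.
def pvB_emit (t : List Char) (maxE : Int) :
    List (List Char × Int) → List String × PySem.Set Int → List String × PySem.Set Int
  | [], s => s
  | (word, pos) :: rest, s =>
    if maxE ≤ (s.1.length : Int) then s
    else if PySem.Set.contains s.2 (PySem.Int.floordiv pos 500) then
      pvB_emit t maxE rest s
    else
      pvB_emit t maxE rest
        (s.1 ++ [String.ofList (pvContextWindow t word pos)], s.2.add (PySem.Int.floordiv pos 500))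

def find_keyword_excerpts_py_alt (text : String) (query : String) (max_excerpts : Int) : List String :=
  let t := text.toList
  let q := query.toList
  if t = [] ∨ q = [] then []
  else
    let splitWords := PySem.Chars.split₀ (PySem.Chars.lower q)
    let filtered := splitWords.filter (fun w => 3 ≤ w.length)
    let query_words := if filtered = [] then splitWords else filtered
    let textL := PySem.Chars.lower t
    (pvB_emit t max_excerpts
      (query_words.flatMap (fun w => pvB_collect textL w (t.length + 1) 0))
      ([], PySem.Set.ofList [])).1

-- ===== PRECONDITION & SPEC =====
def Spec_find_keyword_excerpts_py (text : String) (query : String) (max_excerpts : Int) (out : List String) : Prop := out = find_keyword_excerpts_py_alt text query max_excerpts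
instance (text : String) (query : String) (max_excerpts : Int) (out : List String) : Decidable (Spec_find_keyword_excerpts_py text query max_excerpts out) := by unfold Spec_find_keyword_excerpts_py; infer_instance

-- ===== CLAIM (what is proved, stated in full; the proofs are below) =====
def Claim_equal_find_keyword_excerpts_py : Prop := ∀ (text : String) (query : String) (max_excerpts : Int), Dom_find_keyword_excerpts_py text query max_excerpts → Spec_find_keyword_excerpts_py text query max_excerpts (find_keyword_excerpts_py text query max_excerpts)

-- ===== LEMMAS AND PROOFS =====

-- A nonempty needle is not found at or past the end of the haystack.
lemma pv_findFrom_ge_len (s sub : List Char) (start : Int)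
    (hs : (s.length : Int) ≤ start) (hsub : sub ≠ []) :
    PySem.Chars.findFrom s sub start none = -1 := by
  unfold PySem.Chars.findFrom
  have h0 : ¬ start < 0 := by omega
  simp only [h0, if_false]
  by_cases hlt : (s.length : Int) < start
  · simp [hlt]
  · have hse : start = (s.length : Int) := le_antisymm (not_lt.mp hlt) hs
    subst hse
    simp only [lt_irrefl, if_false]
    have : List.drop ((s.length : Int)).toNat (List.take ((s.length : Int)).toNat s) = [] := by
      simp
    rw [this]
    have hfind : PySem.Chars.find ([] : List Char) sub = -1 :=
      (PySem.Chars.find_eq_neg_one_iff [] sub).mpr (by simp [hsub])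
    simp [hfind]

-- Once the cut-off is reached, the emission pass is a no-op.
lemma pv_emit_sat (t : List Char) (maxE : Int) (l : List (List Char × Int))
    (s : List String × PySem.Set Int) (h : maxE ≤ (s.1.length : Int)) :
    pvB_emit t maxE l s = s := by
  cases l with
  | nil => rfl
  | cons x rest => obtain ⟨w, p⟩ := x; simp [pvB_emit, h]

lemma pv_emit_append (t : List Char) (maxE : Int) :
    ∀ (l1 l2 : List (List Char × Int)) (s : List String × PySem.Set Int),
    pvB_emit t maxE (l1 ++ l2) s = pvB_emit t maxE l2 (pvB_emit t maxE l1 s) := by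
  intro l1
  induction l1 with
  | nil => intro l2 s; rfl
  | cons x rest ih =>
    intro l2 s
    obtain ⟨w, p⟩ := x
    by_cases h : maxE ≤ (s.1.length : Int)
    · simp only [List.cons_append, pvB_emit, if_pos h]
      exact (pv_emit_sat t maxE l2 s h).symm
    · by_cases h2 : PySem.Set.contains s.2 (PySem.Int.floordiv p 500)
      · simp only [List.cons_append, pvB_emit, if_neg h, if_pos h2]; exact ih l2 s
      · simp only [List.cons_append, pvB_emit, if_neg h, if_neg h2]; exact ih l2 _

-- Core: A's inner loop for one (nonempty) word equals B's collect-then-emit.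
lemma pv_word_eq (textL t word : List Char) (hw : word ≠ []) (maxE : Int) :
    ∀ (fuel : Nat) (start : Int), 0 ≤ start → ∀ (s : List String × PySem.Set Int),
    pvA_word textL t word maxE fuel start s
      = pvB_emit t maxE (pvB_collect textL word fuel start) s := by
  intro fuel
  induction fuel with
  | zero => intro start _ s; rfl
  | succ n ih =>
    intro start hstart s
    by_cases h1 : start < (textL.length : Int)
    · by_cases h2 : (s.1.length : Int) < maxE
      · simp only [pvA_word, pvB_collect, if_pos (And.intro h1 h2)]
        by_cases h3 : PySem.Chars.findFrom textL word start none < 0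
        · simp [h3, pvB_emit]
        · simp only [if_neg h3, pvB_emit, if_neg (not_le.mpr h2)]
          have hstart' : (0:Int) ≤ PySem.Chars.findFrom textL word start none + (word.length : Int) := by
            omega
          by_cases h4 : PySem.Set.contains s.2
              (PySem.Int.floordiv (PySem.Chars.findFrom textL word start none) 500)
          · simp only [if_pos h4]; exact ih _ hstart' s
          · simp only [if_neg h4]; exact ih _ hstart' _
      · simp only [pvA_word, if_neg (by tauto : ¬ (start < (textL.length : Int) ∧ (s.1.length : Int) < maxE))]
        exact (pv_emit_sat t maxE _ s (not_lt.mp h2)).symm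
    · have hfind : PySem.Chars.findFrom textL word start none = -1 :=
        pv_findFrom_ge_len textL word start (not_lt.mp h1) hw
      simp only [pvA_word, if_neg (by tauto : ¬ (start < (textL.length : Int) ∧ (s.1.length : Int) < maxE)),
        pvB_collect, hfind]
      norm_num [pvB_emit]

-- Every word produced by split() is nonempty.
lemma pv_split_go_ne_nil :
    ∀ (s cur : List Char) (acc : List (List Char)), (∀ w ∈ acc, w ≠ []) →
      ∀ w ∈ PySem.Chars.split₀.go s cur acc, w ≠ [] := by
  intro s
  induction s with
  | nil =>
    intro cur acc hacc w hw
    simp only [PySem.Chars.split₀.go] at hw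
    by_cases hcur : cur.isEmpty
    · rw [if_pos hcur] at hw
      exact hacc w (List.mem_reverse.mp hw)
    · rw [if_neg hcur] at hw
      rcases List.mem_cons.mp (List.mem_reverse.mp hw) with h | h
      · subst h
        simpa [List.isEmpty_iff, List.reverse_eq_nil_iff] using hcur
      · exact hacc w h
  | cons c rest ih =>
    intro cur acc hacc w hw
    simp only [PySem.Chars.split₀.go] at hw
    by_cases hsp : PySem.Chars.isspace c
    · rw [if_pos hsp] at hw
      by_cases hcur : cur.isEmpty
      · rw [if_pos hcur] at hw
        exact ih [] acc hacc w hw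
      · rw [if_neg hcur] at hw
        refine ih [] _ ?_ w hw
        intro w' hw'
        rcases List.mem_cons.mp hw' with h | h
        · subst h
          simpa [List.isEmpty_iff, List.reverse_eq_nil_iff] using hcur
        · exact hacc w' h
    · rw [if_neg hsp] at hw
      exact ih (c :: cur) acc hacc w hw

lemma pv_split₀_ne_nil (cs : List Char) : ∀ w ∈ PySem.Chars.split₀ cs, w ≠ [] :=
  pv_split_go_ne_nil cs [] [] (by simp)

-- Folding A's per-word loop over the words equals emitting the concatenated matches.
lemma pv_fold_eq (textL t : List Char) (maxE : Int) :
    ∀ (words : List (List Char)), (∀ w ∈ words, w ≠ []) →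
      ∀ (s : List String × PySem.Set Int),
    words.foldl (fun s w => pvA_word textL t w maxE (t.length + 1) 0 s) s
      = pvB_emit t maxE (words.flatMap (fun w => pvB_collect textL w (t.length + 1) 0)) s := by
  intro words
  induction words with
  | nil => intro _ s; rfl
  | cons w ws ih =>
    intro hne s
    simp only [List.foldl_cons, List.flatMap_cons]
    rw [pv_emit_append, ← pv_word_eq textL t w (hne w (by simp)) maxE _ 0 le_rfl s]
    exact ih (fun w' hw' => hne w' (by simp [hw'])) _

-- ===== VERDICT (by name: the statement is the Claim_ definition above) =====
theorem find_keyword_excerpts_py_spec : Claim_equal_find_keyword_excerpts_py := by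
  intro text query max_excerpts _
  unfold Spec_find_keyword_excerpts_py find_keyword_excerpts_py find_keyword_excerpts_py_alt
  by_cases hg : text.toList = [] ∨ query.toList = []
  · simp only [if_pos hg]
  · simp only [if_neg hg]
    refine congrArg Prod.fst ?_
    apply pv_fold_eq
    intro w hw
    by_cases hf : (PySem.Chars.split₀ (PySem.Chars.lower query.toList)).filter (fun w => 3 ≤ w.length) = []
    · rw [if_pos hf] at hw
      exact pv_split₀_ne_nil _ w hw
    · rw [if_neg hf] at hw
      exact pv_split₀_ne_nil _ w (List.mem_of_mem_filter hw)
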